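-- pv_equiv track=rewrite | github.com/pypi-data/pypi-mirror-403 | packages/contextfs/contextfs-0.2.34-py3-none-any.whl/contextfs/filetypes/handlers/go.py | _get_pos_at_line
-- ===== SOURCE A (Python) =====
-- def _get_pos_at_line(content: str, line: int) -> int:
--     """Get character position at start of line."""
--     for i, c in enumerate(content):
--         if line <= 1:
--             return i
--         if c == "\n":
--             line -= 1
--             i + 1
--     return len(content)
-- ===== SOURCE B (Python) =====
-- def _get_pos_at_line(content: str, line: int) -> int:
--     """Get character position at start of line."""
--     pos = 0
--     for _ in range(line - 1):
--         idx = content.find("\n", pos)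
--         if idx == -1:
--             return len(content)
--         pos = idx + 1
--     return pos
-- ===== Notes on version B (the rewrite author's own statement) =====
-- stated objective: faster
-- what changed: B jumps from newline to newline with str.find instead of scanning every character with enumerate and a per-character branch.
import Mathlib
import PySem

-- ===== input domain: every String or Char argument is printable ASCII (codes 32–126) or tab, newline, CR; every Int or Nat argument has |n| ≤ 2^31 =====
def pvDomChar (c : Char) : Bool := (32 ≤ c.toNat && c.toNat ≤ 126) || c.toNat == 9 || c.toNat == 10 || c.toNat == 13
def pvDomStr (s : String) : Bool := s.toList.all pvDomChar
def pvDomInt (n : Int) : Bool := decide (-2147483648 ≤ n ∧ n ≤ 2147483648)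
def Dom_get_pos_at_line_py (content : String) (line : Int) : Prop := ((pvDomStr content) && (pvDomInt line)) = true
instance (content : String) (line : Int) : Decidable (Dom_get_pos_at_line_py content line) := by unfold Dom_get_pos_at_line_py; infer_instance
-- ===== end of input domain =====

-- B replaces A's per-character enumerate scan by jumping from newline to newline with str.find
-- (at most line-1 find calls); return values are identical on all inputs.

-- ===== PORT A =====
-- A: for i, c in enumerate(content): if line <= 1: return i; if c == '\n': line -= 1
--    return len(content)
def goA_get_pos : List Char → Int → Int → Int → Int
  | [], _, _, n => n
  | c :: rest, i, line, n =>
    if line ≤ 1 then i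
    else goA_get_pos rest (i + 1) (if c = '\n' then line - 1 else line) n

def get_pos_at_line_py (content : String) (line : Int) : Int :=
  goA_get_pos content.toList 0 line (PySem.Str.len content)

-- ===== PORT B =====
-- B: pos = 0; for _ in range(line-1): idx = content.find('\n', pos);
--    if idx == -1: return len(content); pos = idx + 1
--    return pos
def goB_get_pos (content : String) : Nat → Int → Int
  | 0, pos => pos
  | k + 1, pos =>
    let idx := PySem.Str.findFrom content "\n" pos
    if idx = -1 then (PySem.Str.len content : Int)
    else goB_get_pos content k (idx + 1)

def get_pos_at_line_py_alt (content : String) (line : Int) : Int :=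
  goB_get_pos content (line - 1).toNat 0

-- ===== PRECONDITION & SPEC =====
def Spec_get_pos_at_line_py (content : String) (line : Int) (out : Int) : Prop := out = get_pos_at_line_py_alt content line
instance (content : String) (line : Int) (out : Int) : Decidable (Spec_get_pos_at_line_py content line out) := by unfold Spec_get_pos_at_line_py; infer_instance

-- ===== CLAIM (what is proved, stated in full; the proofs are below) =====
def Claim_equal_get_pos_at_line_py : Prop := ∀ (content : String) (line : Int), Dom_get_pos_at_line_py content line → Spec_get_pos_at_line_py content line (get_pos_at_line_py content line)

-- ===== LEMMAS AND PROOFS =====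

-- Chars.find with a singleton pattern is determined by "first occurrence"
theorem pv_find_eq_of (cs : List Char) (j : Nat)
    (h1 : [('\n' : Char)] <+: cs.drop j)
    (h2 : ∀ i < j, ¬ [('\n' : Char)] <+: cs.drop i) :
    PySem.Chars.find cs ['\n'] = (j : Int) := by
  have hnn : 0 ≤ PySem.Chars.find cs ['\n'] := by
    rw [PySem.Chars.find_nonneg_iff]
    exact h1.isInfix.trans (List.drop_suffix j cs).isInfix
  obtain ⟨hp, hmin⟩ := PySem.Chars.find_spec hnn
  set m := (PySem.Chars.find cs ['\n']).toNat with hm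
  have : m = j := by
    rcases Nat.lt_trichotomy m j with h | h | h
    · exact absurd hp (h2 m h)
    · exact h
    · exact absurd h1 (hmin j h)
  omega

-- cons characterization of Chars.find for the singleton pattern ['\n']
theorem pv_find_cons (c : Char) (rest : List Char) :
    PySem.Chars.find (c :: rest) ['\n'] =
      if c = '\n' then 0
      else if PySem.Chars.find rest ['\n'] = -1 then -1
      else PySem.Chars.find rest ['\n'] + 1 := by
  split_ifs with hc hr
  · subst hc
    exact pv_find_eq_of _ 0 ⟨rest, rfl⟩ (by omega)
  · rw [PySem.Chars.find_eq_neg_one_iff] at hr ⊢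
    intro hin
    apply hr
    have hmem : ('\n' : Char) ∈ c :: rest := by
      have := hin.sublist
      simpa using (List.singleton_sublist.mp this)
    have hmem' : ('\n' : Char) ∈ rest := by
      rcases hmem with _ | h
      · exact absurd rfl hc
      · assumption
    obtain ⟨s, t, rfl⟩ := List.append_of_mem hmem'
    exact ⟨s, t, by simp⟩
  · have hnn : 0 ≤ PySem.Chars.find rest ['\n'] := by
      have := PySem.Chars.neg_one_le_find rest ['\n']
      omega
    obtain ⟨hp, hmin⟩ := PySem.Chars.find_spec hnn
    set j := (PySem.Chars.find rest ['\n']).toNat with hj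
    have hfr : PySem.Chars.find rest ['\n'] = (j : Int) := by omega
    rw [hfr]
    have : PySem.Chars.find (c :: rest) ['\n'] = ((j + 1 : Nat) : Int) := by
      apply pv_find_eq_of
      · simpa using hp
      · intro i hi
        match i with
        | 0 =>
          rintro ⟨t, ht⟩
          have ht' : '\n' :: t = c :: rest := by simpa using ht
          injection ht' with h1 _
          exact hc h1.symm
        | i + 1 =>
          simpa using hmin i (by omega)
    rw [this]; push_cast; ring

-- one B-iteration skips a non-newline character
theorem pv_goB_step (s : String) (pos : Nat) (c : Char) (rest : List Char)
    (hd : s.toList.drop pos = c :: rest) (hc : c ≠ '\n') (k : Nat) :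
    goB_get_pos s (k + 1) (pos : Int) = goB_get_pos s (k + 1) ((pos + 1 : Nat) : Int) := by
  have hlt : pos < s.toList.length := by
    by_contra h
    rw [List.drop_eq_nil_of_le (by omega)] at hd
    simp at hd
  have hd1 : s.toList.drop (pos + 1) = rest := by
    rw [← List.drop_drop (i := 1) (j := pos), hd]; rfl
  have e1 : PySem.Str.findFrom s "\n" (pos : Int) =
      (if PySem.Chars.find (s.toList.drop pos) ['\n'] = -1 then -1
       else (pos : Int) + PySem.Chars.find (s.toList.drop pos) ['\n']) := by
    rw [PySem.Str.findFrom_eq]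
    simpa using PySem.Chars.findFrom_natCast s.toList ['\n'] pos (le_of_lt hlt)
  have e2 : PySem.Str.findFrom s "\n" ((pos + 1 : Nat) : Int) =
      (if PySem.Chars.find (s.toList.drop (pos + 1)) ['\n'] = -1 then -1
       else ((pos + 1 : Nat) : Int) + PySem.Chars.find (s.toList.drop (pos + 1)) ['\n']) := by
    rw [PySem.Str.findFrom_eq]
    simpa using PySem.Chars.findFrom_natCast s.toList ['\n'] (pos + 1) hlt
  rw [hd] at e1
  rw [hd1] at e2
  rw [pv_find_cons, if_neg hc] at e1
  by_cases hr : PySem.Chars.find rest ['\n'] = -1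
  · simp only [goB_get_pos, e1, e2, hr, reduceIte]
  · have hnn : 0 ≤ PySem.Chars.find rest ['\n'] := by
      have := PySem.Chars.neg_one_le_find rest ['\n']
      omega
    rw [if_neg hr] at e1 e2
    have hcond : PySem.Chars.find rest ['\n'] + 1 ≠ -1 := by omega
    rw [if_neg hcond] at e1
    have hne1 : (pos : Int) + (PySem.Chars.find rest ['\n'] + 1) ≠ -1 := by omega
    have hne2 : ((pos + 1 : Nat) : Int) + PySem.Chars.find rest ['\n'] ≠ -1 := by push_cast; omega
    simp only [goB_get_pos, e1, e2]
    rw [if_neg hne1, if_neg hne2]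
    congr 1
    push_cast; ring

-- main invariant: A's scan from position pos equals B's jump loop from pos
theorem pv_main (s : String) : ∀ (suffix : List Char) (pos : Nat) (line : Int),
    s.toList.drop pos = suffix → pos ≤ s.toList.length →
    goA_get_pos suffix (pos : Int) line ((s.toList.length : Int)) =
      goB_get_pos s (line - 1).toNat (pos : Int) := by
  intro suffix
  induction suffix with
  | nil =>
    intro pos line hd hle
    have hpos : pos = s.toList.length := by
      have := List.drop_eq_nil_iff.mp hd
      omega
    subst hpos
    cases hk : (line - 1).toNat with
    | zero => rfl
    | succ k =>
      have e : PySem.Str.findFrom s "\n" ((s.toList.length : Nat) : Int) = -1 := by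
        rw [PySem.Str.findFrom_eq]
        have h := PySem.Chars.findFrom_natCast s.toList ['\n'] s.toList.length (le_refl _)
        simp only [List.drop_length] at h
        have hnil : PySem.Chars.find ([] : List Char) ['\n'] = -1 := by
          rw [PySem.Chars.find_eq_neg_one_iff]
          intro h'
          have := h'.sublist
          simp at this
        simpa [hnil] using h
      simp only [goA_get_pos, goB_get_pos, e, reduceIte, PySem.Str.len_eq]
  | cons c rest ih =>
    intro pos line hd hle
    have hlt : pos < s.toList.length := by
      by_contra h
      rw [List.drop_eq_nil_of_le (by omega)] at hd
      simp at hd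
    have hd1 : s.toList.drop (pos + 1) = rest := by
      rw [← List.drop_drop (i := 1) (j := pos), hd]; rfl
    by_cases hl : line ≤ 1
    · have hk : (line - 1).toNat = 0 := by omega
      simp only [goA_get_pos, if_pos hl, hk, goB_get_pos]
    · have hl2 : 2 ≤ line := by omega
      have hk : (line - 1).toNat = (line - 2).toNat + 1 := by omega
      by_cases hc : c = '\n'
      · -- newline: B's find lands exactly at pos, both advance to pos+1 with line-1
        subst hc
        have e1 : PySem.Str.findFrom s "\n" (pos : Int) = (pos : Int) := by
          rw [PySem.Str.findFrom_eq]
          have h := PySem.Chars.findFrom_natCast s.toList ['\n'] pos (le_of_lt hlt)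
          rw [hd, pv_find_cons, if_pos rfl] at h
          simpa using h
        have hne : (pos : Int) ≠ -1 := by omega
        rw [hk]
        simp only [goA_get_pos, if_neg hl, goB_get_pos, e1, if_neg hne, if_true]
        have h := ih (pos + 1) (line - 1) hd1 (by omega)
        push_cast at h
        rw [show line - 1 - 1 = line - 2 from by ring] at h
        exact h
      · -- not a newline: A steps one char; B's find skips it (pv_goB_step)
        simp only [goA_get_pos, if_neg hl, if_neg hc]
        have h := ih (pos + 1) line hd1 (by omega)
        push_cast at h
        rw [h, hk]
        have hs := pv_goB_step s pos c rest hd hc (line - 2).toNat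
        push_cast at hs
        exact hs.symm

-- ===== VERDICT (by name: the statement is the Claim_ definition above) =====
theorem get_pos_at_line_py_spec : Claim_equal_get_pos_at_line_py := by
  intro content line _
  show get_pos_at_line_py content line = get_pos_at_line_py_alt content line
  unfold get_pos_at_line_py get_pos_at_line_py_alt
  have h := pv_main content content.toList 0 line (by simp) (by omega)
  simpa [PySem.Str.len_eq] using h
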